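-- pv_equiv track=rewrite | github.com/youryu0212/algorithm | Implementation/python/16935.py | six
-- ===== SOURCE A (Python) =====
-- def divide(arr):
--   half_r, half_c = len(arr)//2, len(arr[0])//2
--   one = [arr[i][:half_c] for i in range(0,half_r)]
--   two = [arr[i][half_c:] for i in range(0,half_r)]
--   three = [arr[i][half_c:] for i in range(half_r,len(arr))]
--   four = [arr[i][:half_c] for i in range(half_r,len(arr))]
--   return one,two,three,four
--
-- def six (arr):
--   one,two,three,four = divide(arr)
--   new_arr = []
--   for i in range(len(arr)//2):
--     new_arr.append(two[i] + three[i])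
--   for i in range(len(arr)//2):
--     new_arr.append(one[i] + four[i])
--   return new_arr
-- ===== SOURCE B (Python) =====
-- def six(arr):
--     n, m = len(arr) // 2, len(arr[0]) // 2
--     out = [[] for _ in range(2 * n)]
--     for i, row in enumerate(arr):
--         if i < 2 * n:
--             j = i % n
--             out[j] = out[j] + row[m:]
--             out[n + j] = out[n + j] + row[:m]
--     return out
-- ===== Notes on version B (the rewrite author's own statement) =====
-- stated objective: alternative
-- what changed: Replaces A's gather (four quadrant lists, then two loops indexing pairs of quadrant rows) with a single scatter pass: preallocate the 2n empty output rows and, for each input row i, append its right half to output row i%n and its left half to output row n+i%n.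
import Mathlib
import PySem

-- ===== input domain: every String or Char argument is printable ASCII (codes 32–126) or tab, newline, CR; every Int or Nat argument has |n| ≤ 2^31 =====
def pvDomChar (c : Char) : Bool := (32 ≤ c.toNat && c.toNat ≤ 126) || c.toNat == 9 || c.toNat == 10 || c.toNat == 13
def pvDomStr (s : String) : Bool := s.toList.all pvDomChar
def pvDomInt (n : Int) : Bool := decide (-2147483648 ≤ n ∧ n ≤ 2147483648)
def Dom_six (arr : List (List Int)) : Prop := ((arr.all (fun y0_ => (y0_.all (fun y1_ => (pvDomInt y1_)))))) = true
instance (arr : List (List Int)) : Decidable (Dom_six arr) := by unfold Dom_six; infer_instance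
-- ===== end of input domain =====

-- B scatters: one pass over the rows distributing each row's halves into 2n preallocated
-- output rows, instead of A's four quadrant lists gathered by two index loops (alternative decomposition).

-- ===== PORT A =====
-- arr[i] for i drawn from range(...) is always in range; ported as pyGetD with default []
def divide (arr : List (List Int)) :
    List (List Int) × List (List Int) × List (List Int) × List (List Int) :=
  let half_r : Int := PySem.Int.floordiv (arr.length : Int) 2
  let half_c : Int := PySem.Int.floordiv ((PySem.List.pyGetD arr 0 []).length : Int) 2
  let one := (PySem.List.pyRange 0 half_r 1).map
    (fun i => PySem.List.slice (PySem.List.pyGetD arr i []) none (some half_c))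
  let two := (PySem.List.pyRange 0 half_r 1).map
    (fun i => PySem.List.slice (PySem.List.pyGetD arr i []) (some half_c) none)
  let three := (PySem.List.pyRange half_r (arr.length : Int) 1).map
    (fun i => PySem.List.slice (PySem.List.pyGetD arr i []) (some half_c) none)
  let four := (PySem.List.pyRange half_r (arr.length : Int) 1).map
    (fun i => PySem.List.slice (PySem.List.pyGetD arr i []) none (some half_c))
  (one, two, three, four)

def six (arr : List (List Int)) : List (List Int) :=
  let q := divide arr
  let one := q.1
  let two := q.2.1
  let three := q.2.2.1
  let four := q.2.2.2
  let new_arr : List (List Int) := []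
  let new_arr := (PySem.List.pyRange 0 (PySem.Int.floordiv (arr.length : Int) 2) 1).foldl
    (fun acc i => acc ++ [PySem.List.pyGetD two i [] ++ PySem.List.pyGetD three i []]) new_arr
  let new_arr := (PySem.List.pyRange 0 (PySem.Int.floordiv (arr.length : Int) 2) 1).foldl
    (fun acc i => acc ++ [PySem.List.pyGetD one i [] ++ PySem.List.pyGetD four i []]) new_arr
  new_arr

-- ===== PORT B =====
-- out[j] read/write always has 0 ≤ j < 2n in range; ported with the total pyGetD/pySetD
def six_alt (arr : List (List Int)) : List (List Int) :=
  let n : Int := PySem.Int.floordiv (arr.length : Int) 2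
  let m : Int := PySem.Int.floordiv ((PySem.List.pyGetD arr 0 []).length : Int) 2
  let out : List (List Int) := List.replicate (2 * n).toNat []
  (PySem.List.enumerate arr 0).foldl
    (fun out p =>
      if p.1 < 2 * n then
        let j := PySem.Int.mod p.1 n
        let out := PySem.List.pySetD out j
          (PySem.List.pyGetD out j [] ++ PySem.List.slice p.2 (some m) none)
        PySem.List.pySetD out (n + j)
          (PySem.List.pyGetD out (n + j) [] ++ PySem.List.slice p.2 none (some m))
      else out) out

-- ===== PRECONDITION & SPEC =====
-- Pre_ excludes only the empty list, on which both Pythons' 'arr[0]' raises IndexError.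
def Pre_six (arr : List (List Int)) : Prop := arr ≠ []
instance (arr : List (List Int)) : Decidable (Pre_six arr) := by unfold Pre_six; infer_instance
def pvWitness_six : List (List Int) := [[1, 2], [3, 4]]

def Spec_six (arr : List (List Int)) (out : List (List Int)) : Prop := out = six_alt arr
instance (arr : List (List Int)) (out : List (List Int)) : Decidable (Spec_six arr out) := by unfold Spec_six; infer_instance

-- ===== CLAIM (what is proved, stated in full; the proofs are below) =====
def Claim_equal_six : Prop := ∀ (arr : List (List Int)), Dom_six arr → Pre_six arr → Spec_six arr (six arr)

-- ===== LEMMAS AND PROOFS =====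

-- right / left half of a row, cut at column m
def rhalf (m : Int) (r : List Int) : List Int := PySem.List.slice r (some m) none
def lhalf (m : Int) (r : List Int) : List Int := PySem.List.slice r none (some m)

-- the cut column both ports use: len(arr[0]) // 2
def mcol (arr : List (List Int)) : Int := (((PySem.List.pyGetD arr 0 []).length / 2 : Nat) : Int)

-- the common canonical value both ports compute
def canon (arr : List (List Int)) (m : Int) : List (List Int) :=
  (List.range (arr.length / 2)).map
    (fun i => rhalf m (arr.getD i []) ++ rhalf m (arr.getD (arr.length / 2 + i) [])) ++
  (List.range (arr.length / 2)).map
    (fun i => lhalf m (arr.getD i []) ++ lhalf m (arr.getD (arr.length / 2 + i) []))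

-- B's accumulator after the first k rows have been processed
def bstate (arr : List (List Int)) (m : Int) (k : Nat) : List (List Int) :=
  (List.range (2 * (arr.length / 2))).map (fun p =>
    if p < arr.length / 2 then
      (if p < k then rhalf m (arr.getD p []) else []) ++
      (if arr.length / 2 + p < k then rhalf m (arr.getD (arr.length / 2 + p) []) else [])
    else
      (if p - arr.length / 2 < k then lhalf m (arr.getD (p - arr.length / 2) []) else []) ++
      (if p < k then lhalf m (arr.getD p []) else []))

-- B's loop body, as one Nat-indexed step
def bstep (arr : List (List Int)) (m : Int) (s : List (List Int)) (k : Nat) : List (List Int) :=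
  if ((k : Int)) < 2 * ((arr.length / 2 : Nat) : Int) then
    PySem.List.pySetD
      (PySem.List.pySetD s (PySem.Int.mod (k : Int) ((arr.length / 2 : Nat) : Int))
        (PySem.List.pyGetD s (PySem.Int.mod (k : Int) ((arr.length / 2 : Nat) : Int)) [] ++
         PySem.List.slice (PySem.List.pyGetD arr (k : Int) []) (some m) none))
      (((arr.length / 2 : Nat) : Int) + PySem.Int.mod (k : Int) ((arr.length / 2 : Nat) : Int))
      (PySem.List.pyGetD
        (PySem.List.pySetD s (PySem.Int.mod (k : Int) ((arr.length / 2 : Nat) : Int))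
          (PySem.List.pyGetD s (PySem.Int.mod (k : Int) ((arr.length / 2 : Nat) : Int)) [] ++
           PySem.List.slice (PySem.List.pyGetD arr (k : Int) []) (some m) none))
        (((arr.length / 2 : Nat) : Int) + PySem.Int.mod (k : Int) ((arr.length / 2 : Nat) : Int)) [] ++
       PySem.List.slice (PySem.List.pyGetD arr (k : Int) []) none (some m))
  else s

lemma hfloor (N : Nat) : PySem.Int.floordiv ((N : Nat) : Int) 2 = ((N / 2 : Nat) : Int) := by
  exact_mod_cast PySem.Int.floordiv_natCast N 2

-- A's two output halves, rewritten from quadrant indexing to direct row indexing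
lemma halfA (arr : List (List Int)) (g : List Int → List Int) :
    (PySem.List.pyRange 0 ((arr.length / 2 : Nat) : Int) 1).map (fun x =>
        PySem.List.pyGetD ((PySem.List.pyRange 0 ((arr.length / 2 : Nat) : Int) 1).map
            (fun i => g (PySem.List.pyGetD arr i []))) x [] ++
        PySem.List.pyGetD ((PySem.List.pyRange ((arr.length / 2 : Nat) : Int) (arr.length : Int) 1).map
            (fun i => g (PySem.List.pyGetD arr i []))) x []) =
    (List.range (arr.length / 2)).map
        (fun i => g (arr.getD i []) ++ g (arr.getD (arr.length / 2 + i) [])) := by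
  rw [PySem.List.pyRange_one ((arr.length / 2 : Nat) : Int) (arr.length : Int)]
  have hsub : (((arr.length : Int)) - ((arr.length / 2 : Nat) : Int)).toNat
      = arr.length - arr.length / 2 := by omega
  rw [hsub, PySem.List.pyRange_zero_nat]
  simp only [List.map_map]
  apply List.ext_getElem
  · simp
  · intro i h1 h2
    have hi : i < arr.length / 2 := by simpa using h1
    simp only [List.getElem_map, List.getElem_range, Function.comp_apply]
    rw [PySem.List.pyGetD_natCast, PySem.List.pyGetD_natCast,
        PySem.List.getD_map_range _ _ _ _ hi,
        PySem.List.getD_map_range _ _ _ _ (show i < arr.length - arr.length / 2 by omega)]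
    simp only [Function.comp_apply]
    have hcast : ((arr.length / 2 : Nat) : Int) + (i : Int)
        = ((arr.length / 2 + i : Nat) : Int) := by push_cast; ring
    rw [hcast, PySem.List.pyGetD_natCast, PySem.List.pyGetD_natCast]

lemma six_eq_canon (arr : List (List Int)) : six arr = canon arr (mcol arr) := by
  simp only [six, divide, hfloor, List.nil_append,
    PySem.List.foldl_append_singleton_eq_map]
  exact congrArg₂ (· ++ ·)
    (halfA arr (fun r => PySem.List.slice r (some (mcol arr)) none))
    (halfA arr (fun r => PySem.List.slice r none (some (mcol arr))))

-- six_alt is the fold of bstep over the row indices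
lemma alt_as_fold (arr : List (List Int)) :
    six_alt arr = (List.range arr.length).foldl (bstep arr (mcol arr))
      (List.replicate (2 * (arr.length / 2)) []) := by
  simp only [six_alt, hfloor]
  rw [PySem.List.enumerate_eq_map_pyRange arr ([] : List Int), List.foldl_map,
      PySem.List.len_eq, PySem.List.pyRange_zero_nat, List.foldl_map]
  have hrep : ((2 * ((arr.length / 2 : Nat) : Int)).toNat) = 2 * (arr.length / 2) := by omega
  rw [hrep]
  rfl

lemma bstate_zero (arr : List (List Int)) (m : Int) :
    bstate arr m 0 = List.replicate (2 * (arr.length / 2)) [] := by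
  unfold bstate
  apply List.ext_getElem
  · simp
  · intro i h1 h2
    simp

-- the accumulator's entries, read through getElem?
lemma bstate_getElem? (arr : List (List Int)) (m : Int) (k q : Nat)
    (hq : q < 2 * (arr.length / 2)) :
    (bstate arr m k)[q]? = some (
      if q < arr.length / 2 then
        (if q < k then rhalf m (arr.getD q []) else []) ++
        (if arr.length / 2 + q < k then rhalf m (arr.getD (arr.length / 2 + q) []) else [])
      else
        (if q - arr.length / 2 < k then lhalf m (arr.getD (q - arr.length / 2) []) else []) ++
        (if q < k then lhalf m (arr.getD q []) else [])) := by
  unfold bstate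
  rw [List.getElem?_map, List.getElem?_range hq]
  rfl

lemma bstate_getD (arr : List (List Int)) (m : Int) (k q : Nat)
    (hq : q < 2 * (arr.length / 2)) :
    (bstate arr m k).getD q [] =
      (if q < arr.length / 2 then
        (if q < k then rhalf m (arr.getD q []) else []) ++
        (if arr.length / 2 + q < k then rhalf m (arr.getD (arr.length / 2 + q) []) else [])
      else
        (if q - arr.length / 2 < k then lhalf m (arr.getD (q - arr.length / 2) []) else []) ++
        (if q < k then lhalf m (arr.getD q []) else [])) := by
  rw [List.getD_eq_getElem?_getD, bstate_getElem? arr m k q hq]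
  rfl

lemma bstate_length (arr : List (List Int)) (m : Int) (k : Nat) :
    (bstate arr m k).length = 2 * (arr.length / 2) := by
  unfold bstate; simp

lemma bstate_step (arr : List (List Int)) (m : Int) (k : Nat) :
    bstep arr m (bstate arr m k) k = bstate arr m (k + 1) := by
  by_cases hk : k < 2 * (arr.length / 2)
  · -- the guard fires: scatter the two halves of row k into rows k%n and n + k%n
    have hn : 0 < arr.length / 2 := by omega
    have hguard : ((k : Int)) < 2 * ((arr.length / 2 : Nat) : Int) := by push_cast; omega
    have hmod : PySem.Int.mod (k : Int) ((arr.length / 2 : Nat) : Int)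
        = ((k % (arr.length / 2) : Nat) : Int) := PySem.Int.mod_natCast k (arr.length / 2)
    have hsum : ((arr.length / 2 : Nat) : Int) + ((k % (arr.length / 2) : Nat) : Int)
        = (((arr.length / 2 + k % (arr.length / 2)) : Nat) : Int) := by push_cast; ring
    have hamod : k % (arr.length / 2) < arr.length / 2 := Nat.mod_lt k hn
    have ha2n : k % (arr.length / 2) < 2 * (arr.length / 2) := by omega
    have hb2n : arr.length / 2 + k % (arr.length / 2) < 2 * (arr.length / 2) := by omega
    have hane : k % (arr.length / 2) ≠ arr.length / 2 + k % (arr.length / 2) := by omega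
    have hor : (k < arr.length / 2 ∧ k % (arr.length / 2) = k) ∨
        (arr.length / 2 ≤ k ∧ k % (arr.length / 2) = k - arr.length / 2) := by
      by_cases hkn : k < arr.length / 2
      · exact Or.inl ⟨hkn, Nat.mod_eq_of_lt hkn⟩
      · refine Or.inr ⟨Nat.le_of_not_lt hkn, ?_⟩
        rw [Nat.mod_eq_sub_mod (Nat.le_of_not_lt hkn)]
        exact Nat.mod_eq_of_lt (by omega)
    rw [bstep, if_pos hguard, hmod, hsum]
    simp only [PySem.List.pySetD_natCast, PySem.List.pyGetD_natCast]
    have e2 : ((bstate arr m k).set (k % (arr.length / 2))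
          ((bstate arr m k).getD (k % (arr.length / 2)) [] ++
            PySem.List.slice (arr.getD k []) (some m) none)).getD
          (arr.length / 2 + k % (arr.length / 2)) []
        = (bstate arr m k).getD (arr.length / 2 + k % (arr.length / 2)) [] := by
      rw [List.getD_eq_getElem?_getD, List.getElem?_set_ne hane, ← List.getD_eq_getElem?_getD]
    rw [e2, bstate_getD arr m k _ hb2n, bstate_getD arr m k _ ha2n]
    apply List.ext_getElem?
    intro q
    by_cases hq2 : q < 2 * (arr.length / 2)
    · rw [bstate_getElem? arr m (k + 1) q hq2]
      have hset : ∀ v, ((bstate arr m k).set (k % (arr.length / 2)) v).length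
          = 2 * (arr.length / 2) := by
        intro v; rw [List.length_set, bstate_length]
      by_cases hqb : q = arr.length / 2 + k % (arr.length / 2)
      · subst hqb
        rw [List.getElem?_set_self (by rw [hset]; exact hb2n)]
        congr 1
        rcases hor with ⟨hkn, hm⟩ | ⟨hkn, hm⟩
        · simp only [hm, Nat.add_sub_cancel_left]
          split_ifs <;> first | (exfalso; omega) | simp [lhalf]
        · have hsk : arr.length / 2 + (k - arr.length / 2) = k := by omega
          simp only [hm, hsk]
          split_ifs <;> first | (exfalso; omega) | simp [lhalf]
      · rw [List.getElem?_set_ne (fun h => hqb h.symm)]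
        by_cases hqa : q = k % (arr.length / 2)
        · subst hqa
          rw [List.getElem?_set_self (by rw [bstate_length]; exact ha2n)]
          congr 1
          rcases hor with ⟨hkn, hm⟩ | ⟨hkn, hm⟩
          · simp only [hm]
            split_ifs <;> first | (exfalso; omega) | simp [rhalf]
          · have hsk : arr.length / 2 + (k - arr.length / 2) = k := by omega
            simp only [hm, hsk]
            split_ifs <;> first | (exfalso; omega) | simp [rhalf]
        · rw [List.getElem?_set_ne (fun h => hqa h.symm),
              bstate_getElem? arr m k q hq2]
          congr 1
          rcases hor with ⟨h1, h2⟩ | ⟨h1, h2⟩ <;> rw [h2] at hqa hqb <;>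
            (split_ifs <;> first | rfl | (exfalso; omega))
    · rw [List.getElem?_eq_none (by simp only [List.length_set, bstate_length]; omega),
         List.getElem?_eq_none (by rw [bstate_length]; omega)]
  · -- the guard is false: row k is the dropped odd leftover row
    have hguard : ¬ ((k : Int)) < 2 * ((arr.length / 2 : Nat) : Int) := by push_cast; omega
    rw [bstep, if_neg hguard]
    unfold bstate
    apply List.map_congr_left
    intro p hp
    have hp2 : p < 2 * (arr.length / 2) := List.mem_range.mp hp
    split_ifs <;> first | rfl | (exfalso; omega)

lemma bstate_fold (arr : List (List Int)) (m : Int) :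
    ∀ K : Nat, (List.range K).foldl (bstep arr m) (bstate arr m 0) = bstate arr m K := by
  intro K
  induction K with
  | zero => rfl
  | succ k ih =>
      rw [List.range_succ, List.foldl_append, ih, List.foldl_cons, List.foldl_nil, bstate_step]

lemma bstate_final (arr : List (List Int)) (m : Int) :
    bstate arr m arr.length = canon arr m := by
  unfold bstate canon
  rw [show 2 * (arr.length / 2) = arr.length / 2 + arr.length / 2 from by ring,
      List.range_add, List.map_append, List.map_map]
  refine congrArg₂ (· ++ ·) (List.map_congr_left ?_) (List.map_congr_left ?_)
  · intro p hp
    have h : p < arr.length / 2 := List.mem_range.mp hp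
    split_ifs <;> first | rfl | (exfalso; omega)
  · intro p hp
    have h : p < arr.length / 2 := List.mem_range.mp hp
    simp only [Function.comp_apply, Nat.add_sub_cancel_left]
    split_ifs <;> first | rfl | (exfalso; omega)

lemma six_alt_eq_canon (arr : List (List Int)) : six_alt arr = canon arr (mcol arr) := by
  rw [alt_as_fold, ← bstate_zero, bstate_fold, bstate_final]

-- ===== VERDICT (by name: the statement is the Claim_ definition above) =====
theorem six_spec : Claim_equal_six := by
  intro arr _ _
  unfold Spec_six
  rw [six_eq_canon, six_alt_eq_canon]
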